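-- pv_equiv track=rewrite | github.com/yesl-kim/algorithm-problem-solving | f-lab/행복한 식물.py | solution
-- ===== SOURCE A (Python) =====
-- def solution(initial_emotions, orders):
--     emotions = list(initial_emotions)
--     cnts = []
--     for x in orders:
--         for i, emotion in enumerate(emotions):
--             if not emotion:
--                 continue
--             emotions[i] = initial_emotions[i] if x == i + 1 else emotion - 1
--         cnts.append(sum(e > 0 for e in emotions))
--     return cnts
-- ===== SOURCE B (Python) =====
-- def solution(initial_emotions, orders):
--     n = len(initial_emotions)
--     m = len(orders)
--     # expiration step per plant: plant i is positive after step t exactly when t < exp[i]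
--     exp = [v if v > 0 else 0 for v in initial_emotions]
--     for t, x in enumerate(orders, 1):
--         if 1 <= x <= n and initial_emotions[x - 1] > 0 and t <= exp[x - 1]:
--             exp[x - 1] = t + initial_emotions[x - 1]
--     diff = [0] * (m + 1)
--     for e in exp:
--         k = min(e - 1, m)
--         if k > 0:
--             diff[0] += 1
--             diff[k] -= 1
--     res = []
--     cnt = 0
--     for t in range(m):
--         cnt += diff[t]
--         res.append(cnt)
--     return res
-- ===== Notes on version B (the rewrite author's own statement) =====
-- stated objective: faster
-- what changed: Instead of simulating every plant at every order (nested loops), B computes each positive plant's single expiration step by scanning the orders once (a reset at step t succeeds iff t has not passed the current expiration), then produces all counts at once with a difference array and one prefix-sum pass.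
import Mathlib
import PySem

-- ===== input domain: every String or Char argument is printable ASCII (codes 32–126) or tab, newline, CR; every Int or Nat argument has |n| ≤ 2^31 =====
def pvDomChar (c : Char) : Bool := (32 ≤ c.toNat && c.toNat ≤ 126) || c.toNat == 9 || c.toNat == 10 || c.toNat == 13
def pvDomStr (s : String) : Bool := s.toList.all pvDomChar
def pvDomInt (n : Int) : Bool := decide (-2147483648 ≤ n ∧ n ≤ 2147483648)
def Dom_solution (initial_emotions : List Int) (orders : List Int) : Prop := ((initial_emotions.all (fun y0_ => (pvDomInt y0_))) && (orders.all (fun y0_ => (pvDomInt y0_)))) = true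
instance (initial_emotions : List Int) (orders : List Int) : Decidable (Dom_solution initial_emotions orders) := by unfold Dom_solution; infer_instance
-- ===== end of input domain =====

-- B replaces A's per-order full rescan of all plants by per-plant expiration steps
-- (one pass over the orders) plus a difference array turned into counts by one
-- prefix-sum pass (objective: faster, O(n+m) instead of O(n*m)).

-- ===== PORT A =====
-- sum(e > 0 for e in emotions)
def countPos (es : List Int) : Int := es.foldl (fun a e => a + (if 0 < e then 1 else 0)) 0

-- the inner `for i, emotion in enumerate(emotions)` loop: rebuilds the list with the
-- in-place writes (emotions[i] is only read/written at position i; initial_emotions[i]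
-- is always in range since emotions is a copy of it, so getD is exact)
def rowA (initial : List Int) (x : Int) : List Int → Nat → List Int
  | [], _ => []
  | e :: rest, i =>
      (if e = 0 then e else if x = (i : Int) + 1 then initial.getD i 0 else e - 1)
        :: rowA initial x rest (i + 1)

-- the outer `for x in orders` loop with state (emotions, cnts)
def solGoA (initial : List Int) : List Int → List Int → List Int → List Int
  | [], _, cnts => cnts
  | x :: rest, emotions, cnts =>
      let emotions' := rowA initial x emotions 0
      solGoA initial rest emotions' (cnts ++ [countPos emotions'])

def solution (initial_emotions : List Int) (orders : List Int) : List Int :=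
  solGoA initial_emotions orders initial_emotions []

-- ===== PORT B =====
-- exp = [v if v > 0 else 0 for v in initial_emotions]
def expInit (initial : List Int) : List Int := initial.map (fun v => if 0 < v then v else 0)

-- for t, x in enumerate(orders, 1): conditional single-index update of exp
def bLoop (initial : List Int) (n : Nat) : List Int → Nat → List Int → List Int
  | [], _, exp => exp
  | x :: rest, t, exp =>
      let exp' :=
        if 1 ≤ x ∧ x ≤ (n : Int) ∧ 0 < initial.getD (x - 1).toNat 0 ∧
             (t : Int) ≤ exp.getD (x - 1).toNat 0 then
          exp.set (x - 1).toNat ((t : Int) + initial.getD (x - 1).toNat 0)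
        else exp
      bLoop initial n rest (t + 1) exp'

-- for e in exp: k = min(e-1, m); if k > 0: diff[0] += 1; diff[k] -= 1
def diffAdd (m : Nat) (diff : List Int) (e : Int) : List Int :=
  let k := min (e - 1) (m : Int)
  if 0 < k then
    let d1 := diff.set 0 (diff.getD 0 0 + 1)
    d1.set k.toNat (d1.getD k.toNat 0 - 1)
  else diff

-- for t in range(m): cnt += diff[t]; res.append(cnt)   (over diff[:m])
def bScan : List Int → Int → List Int
  | [], _ => []
  | d :: rest, cnt => (cnt + d) :: bScan rest (cnt + d)

def solution_alt (initial_emotions : List Int) (orders : List Int) : List Int :=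
  let n := initial_emotions.length
  let m := orders.length
  let exp := bLoop initial_emotions n orders 1 (expInit initial_emotions)
  let diff := exp.foldl (diffAdd m) (List.replicate (m + 1) (0 : Int))
  bScan (diff.take m) 0

-- ===== PRECONDITION & SPEC =====
def Spec_solution (initial_emotions : List Int) (orders : List Int) (out : List Int) : Prop := out = solution_alt initial_emotions orders
instance (initial_emotions : List Int) (orders : List Int) (out : List Int) : Decidable (Spec_solution initial_emotions orders out) := by unfold Spec_solution; infer_instance

-- ===== CLAIM (what is proved, stated in full; the proofs are below) =====
def Claim_equal_solution : Prop := ∀ (initial_emotions : List Int) (orders : List Int), Dom_solution initial_emotions orders → Spec_solution initial_emotions orders (solution initial_emotions orders)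

-- ===== LEMMAS AND PROOFS =====

-- per-plant value recursion (A's update of one slot, time-independent)
def ps (v ip1 : Int) : List Int → Int → Int
  | [], s => s
  | x :: rest, s => ps v ip1 rest (if s = 0 then s else if x = ip1 then v else s - 1)

-- per-plant expiration recursion (B's update of one slot)
def pe (v ip1 : Int) : List Int → Nat → Int → Int
  | [], _, e => e
  | x :: rest, t, e =>
      pe v ip1 rest (t + 1) (if x = ip1 ∧ 0 < v ∧ (t : Int) ≤ e then (t : Int) + v else e)

-- the emotions vector after processing a prefix of orders, per-plant form
def psVec (initial pref : List Int) : List Int :=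
  (List.range initial.length).map (fun j => ps (initial.getD j 0) ((j : Int) + 1) pref (initial.getD j 0))

-- final expiration of plant j
def eFin (initial orders : List Int) (j : Nat) : Int :=
  pe (initial.getD j 0) ((j : Int) + 1) orders 1 (if 0 < initial.getD j 0 then initial.getD j 0 else 0)

-- the common specification of both ports
def specCnts (initial orders : List Int) : List Int :=
  (List.range orders.length).map
    (fun (t : Nat) => ((List.range initial.length).countP (fun j => (t : Int) + 1 < eFin initial orders j) : Int))

-- ---------- generic list lemma ----------
theorem sum_take_set (l : List Int) : ∀ (i q : Nat) (a : Int), i < l.length →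
    ((l.set i a).take q).sum = (l.take q).sum + (if i < q then a - l.getD i 0 else 0) := by
  induction l with
  | nil => intro i q a h; simp at h
  | cons b bs ih =>
    intro i q a h
    cases q with
    | zero => simp
    | succ q' =>
      cases i with
      | zero => simp [List.getD]; ring
      | succ i' =>
        simp only [List.set_cons_succ, List.take_succ_cons, List.sum_cons,
          List.getD_cons_succ]
        rw [ih i' q' a (by simpa using h)]
        by_cases hiq : i' < q' <;> simp [hiq] <;> ring

-- ---------- per-plant lemmas ----------
theorem ps_append (v ip1 : Int) (l1 l2 : List Int) : ∀ s,
    ps v ip1 (l1 ++ l2) s = ps v ip1 l2 (ps v ip1 l1 s) := by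
  induction l1 with
  | nil => intro s; simp [ps]
  | cons x rest ih => intro s; simp [ps, ih]

theorem pe_append (v ip1 : Int) (l1 l2 : List Int) : ∀ (t : Nat) (e : Int),
    pe v ip1 (l1 ++ l2) t e = pe v ip1 l2 (t + l1.length) (pe v ip1 l1 t e) := by
  induction l1 with
  | nil => intro t e; simp [pe]
  | cons x rest ih =>
    intro t e
    simp only [List.cons_append, pe, ih, List.length_cons]
    congr 1
    omega

theorem ps_nonpos (v ip1 : Int) (hv : v ≤ 0) : ∀ (l : List Int) (s : Int), s ≤ 0 →
    ps v ip1 l s ≤ 0 := by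
  intro l
  induction l with
  | nil => intro s hs; simpa [ps] using hs
  | cons x rest ih =>
    intro s hs
    simp only [ps]
    apply ih
    split_ifs <;> omega

theorem pe_nonpos (v ip1 : Int) (hv : ¬ 0 < v) : ∀ (l : List Int) (t : Nat) (e : Int),
    pe v ip1 l t e = e := by
  intro l
  induction l with
  | nil => intro t e; simp [pe]
  | cons x rest ih =>
    intro t e
    simp only [pe]
    rw [if_neg (by tauto), ih]

theorem ps_pe (v ip1 : Int) (hv : 0 < v) : ∀ (l : List Int) (t : Nat) (e : Int),
    ps v ip1 l (max (e - (t : Int)) 0) =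
      max (pe v ip1 l (t + 1) e - ((t : Int) + l.length)) 0 := by
  intro l
  induction l with
  | nil => intro t e; simp [ps, pe]
  | cons x rest ih =>
    intro t e
    simp only [ps, pe, List.length_cons]
    have key : (if max (e - (t : Int)) 0 = 0 then max (e - (t : Int)) 0
        else if x = ip1 then v else max (e - (t : Int)) 0 - 1) =
        max ((if x = ip1 ∧ 0 < v ∧ ((t : Nat) + 1 : Int) ≤ e then ((t : Nat) + 1 : Int) + v else e)
          - ((t : Nat) + 1 : Int)) 0 := by
      by_cases hd : e ≤ (t : Int)
      · rw [if_pos (by omega), if_neg (by push_cast; omega)]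
        omega
      · rw [if_neg (by omega)]
        by_cases hx : x = ip1
        · rw [if_pos hx, if_pos ⟨hx, hv, by push_cast; omega⟩]
          omega
        · rw [if_neg hx, if_neg (by tauto)]
          omega
    rw [key]
    have h2 := ih (t + 1) (if x = ip1 ∧ 0 < v ∧ (t : Int) + 1 ≤ e then (t : Int) + 1 + v else e)
    push_cast at h2 ⊢
    rw [h2]
    omega

theorem pe_dead (v ip1 : Int) : ∀ (l : List Int) (t : Nat) (e : Int), e < (t : Int) →
    pe v ip1 l t e = e := by
  intro l
  induction l with
  | nil => intro t e _; simp [pe]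
  | cons x rest ih =>
    intro t e h
    simp only [pe]
    rw [if_neg (by push_cast; omega), ih]
    push_cast; omega

theorem pe_alive (v ip1 : Int) (hv : 0 < v) (τ : Int) : ∀ (l : List Int) (t : Nat) (e : Int),
    τ < e → τ < (t : Int) → τ < pe v ip1 l t e := by
  intro l
  induction l with
  | nil => intro t e he _; simpa [pe] using he
  | cons x rest ih =>
    intro t e he ht
    simp only [pe]
    apply ih
    · split_ifs <;> omega
    · push_cast; omega

-- the per-plant bridge: plant positive after step τ  ↔  final expiration exceeds τ
theorem ps_pos_iff_eFin (v ip1 : Int) (orders : List Int) (τ : Nat)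
    (hτ1 : 1 ≤ τ) (hτm : τ ≤ orders.length) :
    (0 < ps v ip1 (orders.take τ) v) ↔
      ((τ : Int) < pe v ip1 orders 1 (if 0 < v then v else 0)) := by
  by_cases hv : 0 < v
  · rw [if_pos hv]
    have hsplit := pe_append v ip1 (orders.take τ) (orders.drop τ) 1 v
    rw [List.take_append_drop] at hsplit
    have hlen : (orders.take τ).length = τ := by simp [hτm]
    set eτ := pe v ip1 (orders.take τ) 1 v with heτ
    have hps : ps v ip1 (orders.take τ) v = max (eτ - (τ : Int)) 0 := by
      have := ps_pe v ip1 hv (orders.take τ) 0 v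
      simpa [hlen, hv.le, max_eq_left hv.le] using this
    rw [hps, hsplit, hlen]
    constructor
    · intro h
      apply pe_alive v ip1 hv (τ : Int) _ _ _ (by omega) (by push_cast; omega)
    · intro h
      by_contra hcon
      rw [pe_dead v ip1 _ _ _ (by push_cast; omega)] at h
      omega
  · rw [if_neg hv, pe_nonpos v ip1 hv]
    have := ps_nonpos v ip1 (by omega) (orders.take τ) v (by omega)
    constructor <;> intro h <;> omega

-- ---------- A-side lemmas ----------
theorem countPos_aux (es : List Int) : ∀ a : Int,
    es.foldl (fun a e => a + (if 0 < e then 1 else 0)) a = a + (es.countP (fun e => decide (0 < e)) : Int) := by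
  induction es with
  | nil => intro a; simp
  | cons e rest ih =>
    intro a
    simp only [List.foldl_cons, List.countP_cons, ih]
    by_cases h : 0 < e <;> simp [h] <;> push_cast <;> ring

theorem countPos_eq (es : List Int) : countPos es = (es.countP (fun e => decide (0 < e)) : Int) := by
  simpa using countPos_aux es 0

theorem rowA_length (initial : List Int) (x : Int) : ∀ (es : List Int) (i : Nat),
    (rowA initial x es i).length = es.length := by
  intro es
  induction es with
  | nil => intro i; simp [rowA]
  | cons e rest ih => intro i; simp [rowA, ih]

theorem rowA_getElem (initial : List Int) (x : Int) : ∀ (es : List Int) (i j : Nat)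
    (h : j < es.length),
    (rowA initial x es i)[j]'(by rw [rowA_length]; exact h) =
      (if es[j] = 0 then es[j]
       else if x = ((i + j : Nat) : Int) + 1 then initial.getD (i + j) 0 else es[j] - 1) := by
  intro es
  induction es with
  | nil => intro i j h; simp at h
  | cons e rest ih =>
    intro i j h
    cases j with
    | zero => simp [rowA]
    | succ j' =>
      have := ih (i + 1) j' (by simpa using h)
      simp only [rowA, List.getElem_cons_succ]
      rw [this]
      have harith : i + 1 + j' = i + (j' + 1) := by omega
      rw [harith]

theorem psVec_length (initial pref : List Int) : (psVec initial pref).length = initial.length := by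
  simp [psVec]

theorem psVec_getElem (initial pref : List Int) (j : Nat) (h : j < initial.length) :
    (psVec initial pref)[j]'(by rw [psVec_length]; exact h) =
      ps (initial.getD j 0) ((j : Int) + 1) pref (initial.getD j 0) := by
  simp [psVec]

theorem psVec_nil (initial : List Int) : psVec initial [] = initial := by
  apply List.ext_getElem (by simp [psVec_length])
  intro j h1 h2
  rw [psVec_getElem initial [] j h2]
  simp [ps, List.getD, h2]

theorem rowA_psVec (initial pref : List Int) (x : Int) :
    rowA initial x (psVec initial pref) 0 = psVec initial (pref ++ [x]) := by
  apply List.ext_getElem (by rw [rowA_length, psVec_length, psVec_length])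
  intro j h1 h2
  have hj : j < initial.length := by rw [rowA_length, psVec_length] at h1; exact h1
  rw [rowA_getElem initial x (psVec initial pref) 0 j (by rwa [psVec_length]),
    psVec_getElem initial (pref ++ [x]) j hj, ps_append]
  simp only [Nat.zero_add]
  rw [psVec_getElem initial pref j hj]
  simp [ps]

theorem solGoA_spec (initial : List Int) : ∀ (rest pref cnts : List Int),
    solGoA initial rest (psVec initial pref) cnts =
      cnts ++ (List.range rest.length).map
        (fun t => countPos (psVec initial (pref ++ rest.take (t + 1)))) := by
  intro rest
  induction rest with
  | nil => intro pref cnts; simp [solGoA]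
  | cons x rest' ih =>
    intro pref cnts
    simp only [solGoA, rowA_psVec]
    rw [ih (pref ++ [x])]
    rw [List.append_assoc, List.singleton_append, List.length_cons,
      List.range_succ_eq_map, List.map_cons, List.map_map]
    refine congrArg (cnts ++ ·) (List.cons_eq_cons.mpr ⟨by simp, ?_⟩)
    apply List.map_congr_left
    intro t _
    simp [Function.comp, List.append_assoc]

theorem A_mid (initial orders : List Int) :
    solution initial orders = (List.range orders.length).map
      (fun t => countPos (psVec initial (orders.take (t + 1)))) := by
  have := solGoA_spec initial orders [] []
  rw [psVec_nil] at this
  simpa [solution] using this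

theorem A_eq_spec : ∀ initial orders, solution initial orders = specCnts initial orders := by
  intro initial orders
  rw [A_mid]
  unfold specCnts
  apply List.map_congr_left
  intro t ht
  rw [List.mem_range] at ht
  rw [countPos_eq, psVec, List.countP_map]
  norm_cast
  apply List.countP_congr
  intro j hj
  rw [List.mem_range] at hj
  simp only [Function.comp, decide_eq_true_eq, decide_eq_decide, eFin]
  have h := ps_pos_iff_eFin (initial.getD j 0) ((j : Int) + 1) orders (t + 1) (by omega) (by omega)
  push_cast at h ⊢
  exact h

-- ---------- B-side lemmas ----------
theorem bLoop_length (initial : List Int) (n : Nat) : ∀ (l : List Int) (t : Nat) (exp : List Int),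
    (bLoop initial n l t exp).length = exp.length := by
  intro l
  induction l with
  | nil => intro t exp; simp [bLoop]
  | cons x rest ih =>
    intro t exp
    simp only [bLoop]
    split_ifs <;> simp [ih]

theorem getD_set_int (l : List Int) (i j : Nat) (a : Int) :
    (l.set i a).getD j 0 = if i = j ∧ j < l.length then a else l.getD j 0 := by
  by_cases hij : i = j ∧ j < l.length
  · rw [if_pos hij, ← hij.1, List.getD_eq_getElem _ 0 (by simpa [hij.1] using hij.2),
      List.getElem_set_self]
  · rw [if_neg hij]
    by_cases hj : j < l.length
    · have hne : i ≠ j := by tauto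
      rw [List.getD_eq_getElem _ 0 (by simpa using hj), List.getD_eq_getElem _ 0 hj,
        List.getElem_set_ne hne]
    · rw [List.getD_eq_default _ 0 (by simpa using hj), List.getD_eq_default _ 0 (by omega)]

theorem bLoop_getD (initial : List Int) : ∀ (l : List Int) (t : Nat) (exp : List Int),
    exp.length = initial.length → ∀ (j : Nat), j < initial.length →
    (bLoop initial initial.length l t exp).getD j 0 =
      pe (initial.getD j 0) ((j : Int) + 1) l t (exp.getD j 0) := by
  intro l
  induction l with
  | nil => intro t exp hlen j hj; simp [bLoop, pe]
  | cons x rest ih =>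
    intro t exp hlen j hj
    simp only [bLoop, pe]
    by_cases hC : 1 ≤ x ∧ x ≤ (initial.length : Int) ∧ 0 < initial.getD (x - 1).toNat 0 ∧
        (t : Int) ≤ exp.getD (x - 1).toNat 0
    · rw [if_pos hC,
        ih (t + 1) (exp.set (x - 1).toNat ((t : Int) + initial.getD (x - 1).toNat 0))
          (by simpa using hlen) j hj]
      congr 1
      rw [getD_set_int]
      by_cases hx : x = (j : Int) + 1
      · have hidx : (x - 1).toNat = j := by omega
        rw [if_pos ⟨hidx, by omega⟩, if_pos ⟨hx, by rw [← hidx]; exact hC.2.2.1,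
          by rw [← hidx]; exact hC.2.2.2⟩, hidx]
      · have hidx : ¬((x - 1).toNat = j ∧ j < exp.length) := by
          intro hcon
          exact hx (by omega)
        rw [if_neg hidx, if_neg (by tauto)]
    · rw [if_neg hC, ih (t + 1) exp hlen j hj]
      congr 1
      rw [if_neg]
      intro ⟨hx, hv, ht⟩
      have hidx : (x - 1).toNat = j := by omega
      exact hC ⟨by omega, by omega, by rw [hidx]; exact hv, by rw [hidx]; exact ht⟩

theorem expInit_length (initial : List Int) : (expInit initial).length = initial.length := by
  simp [expInit]

theorem exp_eq_map (initial orders : List Int) :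
    bLoop initial initial.length orders 1 (expInit initial) =
      (List.range initial.length).map (eFin initial orders) := by
  apply List.ext_getElem (by simp [bLoop_length, expInit_length])
  intro j h1 h2
  have hj : j < initial.length := by simpa using h2
  have hlen : (expInit initial).length = initial.length := expInit_length initial
  have hblen : j < (bLoop initial initial.length orders 1 (expInit initial)).length := by
    rw [bLoop_length, hlen]; exact hj
  rw [← List.getD_eq_getElem _ 0 hblen,
    bLoop_getD initial orders 1 (expInit initial) hlen j hj]
  have hg : initial.getD j 0 = initial[j] := List.getD_eq_getElem initial 0 hj
  have hE : (expInit initial).getD j 0 = (if 0 < initial[j] then initial[j] else 0) := by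
    rw [List.getD_eq_getElem _ 0 (by omega)]
    simp [expInit]
  rw [hE]
  simp only [List.getElem_map, List.getElem_range, eFin, List.getD,
    List.getElem?_eq_getElem hj, Option.getD_some]

theorem diffAdd_length (m : Nat) (diff : List Int) (e : Int) :
    (diffAdd m diff e).length = diff.length := by
  simp only [diffAdd]
  split_ifs <;> simp

theorem sum_take_diffAdd (m t : Nat) (diff : List Int) (e : Int)
    (hlen : diff.length = m + 1) (ht : t < m) :
    ((diffAdd m diff e).take (t + 1)).sum =
      (diff.take (t + 1)).sum + (if (t : Int) < min (e - 1) (m : Int) then 1 else 0) := by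
  simp only [diffAdd]
  by_cases hk : 0 < min (e - 1) (m : Int)
  · rw [if_pos hk]
    have h0 : 0 < diff.length := by omega
    have hkm : (min (e - 1) (m : Int)).toNat < (diff.set 0 (diff.getD 0 0 + 1)).length := by
      simp only [List.length_set]; omega
    rw [sum_take_set _ _ _ _ hkm, sum_take_set _ _ _ _ h0]
    have hd : diff.getD 0 0 + 1 - diff.getD 0 0 = 1 := by ring
    rw [if_pos (by omega : (0 : Nat) < t + 1), hd]
    by_cases hkt : (min (e - 1) (m : Int)).toNat < t + 1
    · rw [if_pos hkt, if_neg (by omega)]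
      ring
    · rw [if_neg hkt, if_pos (by omega)]
      ring
  · rw [if_neg hk, if_neg (by omega)]
    ring

theorem foldl_diffAdd (m t : Nat) (ht : t < m) : ∀ (es diff : List Int),
    diff.length = m + 1 →
    ((es.foldl (diffAdd m) diff).take (t + 1)).sum =
      (diff.take (t + 1)).sum +
        (es.countP (fun e => decide ((t : Int) < min (e - 1) (m : Int))) : Int) := by
  intro es
  induction es with
  | nil => intro diff hlen; simp
  | cons e rest ih =>
    intro diff hlen
    simp only [List.foldl_cons, List.countP_cons]
    rw [ih (diffAdd m diff e) (by rw [diffAdd_length]; exact hlen),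
      sum_take_diffAdd m t diff e hlen ht]
    by_cases hc : (t : Int) < min (e - 1) (m : Int) <;> simp [hc] <;> push_cast <;> ring

theorem foldl_diffAdd_length (m : Nat) : ∀ (es diff : List Int),
    (es.foldl (diffAdd m) diff).length = diff.length := by
  intro es
  induction es with
  | nil => intro diff; simp
  | cons e rest ih => intro diff; rw [List.foldl_cons, ih, diffAdd_length]

theorem bScan_length : ∀ (l : List Int) (c : Int), (bScan l c).length = l.length := by
  intro l
  induction l with
  | nil => intro c; simp [bScan]
  | cons d rest ih => intro c; simp [bScan, ih]

theorem bScan_getElem : ∀ (l : List Int) (c : Int) (t : Nat) (h : t < l.length),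
    (bScan l c)[t]'(by rw [bScan_length]; exact h) = c + (l.take (t + 1)).sum := by
  intro l
  induction l with
  | nil => intro c t h; simp at h
  | cons d rest ih =>
    intro c t h
    cases t with
    | zero => simp [bScan]
    | succ t' =>
      have := ih (c + d) t' (by simpa using h)
      simp only [bScan, List.getElem_cons_succ, List.take_succ_cons, List.sum_cons]
      rw [this]
      ring

theorem B_eq_spec : ∀ initial orders, solution_alt initial orders = specCnts initial orders := by
  intro initial orders
  unfold solution_alt specCnts
  have hdlen : ((bLoop initial initial.length orders 1 (expInit initial)).foldl
      (diffAdd orders.length) (List.replicate (orders.length + 1) (0 : Int))).length =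
      orders.length + 1 := by
    rw [foldl_diffAdd_length]; simp
  apply List.ext_getElem (by simp [bScan_length, hdlen])
  intro t h1 h2
  have ht : t < orders.length := by simpa using h2
  have htake : t < (((bLoop initial initial.length orders 1 (expInit initial)).foldl
      (diffAdd orders.length) (List.replicate (orders.length + 1) (0 : Int))).take
        orders.length).length := by
    simp [hdlen]; omega
  rw [bScan_getElem _ 0 t htake, List.take_take]
  have hmin : min (t + 1) orders.length = t + 1 := by omega
  rw [hmin, foldl_diffAdd orders.length t ht _ _ (by simp)]
  rw [exp_eq_map, List.countP_map]
  simp only [List.getElem_map, List.getElem_range, List.take_replicate]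
  rw [show min (t + 1) (orders.length + 1) = t + 1 by omega]
  simp only [List.sum_replicate, smul_zero, zero_add]
  norm_cast
  apply List.countP_congr
  intro j hj
  simp only [Function.comp, decide_eq_decide, decide_eq_true_eq]
  constructor <;> intro hh <;> omega

-- ===== VERDICT (by name: the statement is the Claim_ definition above) =====
theorem solution_spec : Claim_equal_solution := by
  intro initial orders _
  unfold Spec_solution
  rw [A_eq_spec, B_eq_spec]
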